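-- pv_equiv track=rewrite | github.com/aisyaharfanii/tugas-struktur-data-5 | maze_solver.py | render_maze
-- ===== SOURCE A (Python) =====
-- class Color:
--     RESET   = "\033[0m"
--     WALL    = "\033[48;5;17m  \033[0m"        # Biru gelap (dinding)
--     PATH    = "\033[48;5;255m  \033[0m"        # Putih (jalan kosong)
--     START   = "\033[48;5;36m\033[97m . \033[0m"  # Hijau tua (titik awal)
--     END     = "\033[48;5;214m\033[97m E \033[0m"  # Oranye (titik akhir)
--     VISITED = "\033[48;5;152m\033[36m x \033[0m"  # Hijau muda (sudah dikunjungi)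
--     FRONTIER= "\033[48;5;222m\033[33m o \033[0m"  # Kuning muda (frontier/antrian)
--     RESULT  = "\033[48;5;120m\033[32m * \033[0m"  # Hijau terang (jalur solusi)
--
-- def render_maze(maze, visited=set(), frontier=set(), path=set(), start=None, end=None):
--     """Tampilkan labirin dengan warna di terminal"""
--     output = []
--     for r, row in enumerate(maze):
--         line = ""
--         for c, cell in enumerate(row):
--             pos = (r, c)
--             if pos == start:
--                 line += Color.START
--             elif pos == end:
--                 line += Color.END
--             elif pos in path:
--                 line += Color.RESULT
--             elif pos in frontier:
--                 line += Color.FRONTIER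
--             elif pos in visited:
--                 line += Color.VISITED
--             elif cell == '#':
--                 line += Color.WALL
--             else:
--                 line += Color.PATH
--         output.append(line)
--     return "\n".join(output)
-- ===== SOURCE B (Python) =====
-- class Color:
--     RESET   = "\033[0m"
--     WALL    = "\033[48;5;17m  \033[0m"
--     PATH    = "\033[48;5;255m  \033[0m"
--     START   = "\033[48;5;36m\033[97m . \033[0m"
--     END     = "\033[48;5;214m\033[97m E \033[0m"
--     VISITED = "\033[48;5;152m\033[36m x \033[0m"
--     FRONTIER= "\033[48;5;222m\033[33m o \033[0m"
--     RESULT  = "\033[48;5;120m\033[32m * \033[0m"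
--
-- def render_maze(maze, visited=set(), frontier=set(), path=set(), start=None, end=None):
--     # Painter's algorithm: render the base canvas from the maze alone, then
--     # stamp each overlay layer onto it in increasing precedence (last wins).
--     canvas = [[Color.WALL if ch == '#' else Color.PATH for ch in row] for row in maze]
--     def stamp(points, color):
--         for r, c in points:
--             if 0 <= r < len(canvas) and 0 <= c < len(canvas[r]):
--                 canvas[r][c] = color
--     stamp(visited, Color.VISITED)
--     stamp(frontier, Color.FRONTIER)
--     stamp(path, Color.RESULT)
--     if end is not None:
--         stamp([end], Color.END)
--     if start is not None:
--         stamp([start], Color.START)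
--     return "\n".join("".join(row) for row in canvas)
-- ===== Notes on version B (the rewrite author's own statement) =====
-- stated objective: alternative
-- what changed: B uses a painter's algorithm: it first renders a base canvas (wall/path color per cell) from the maze alone, then stamps each overlay layer (visited, frontier, path, end, start) onto the canvas by bounds-checked index assignment in increasing precedence so the last stamp wins, and finally joins the canvas; A instead decides each cell once with a five-way membership/equality elif chain.
import Mathlib
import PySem

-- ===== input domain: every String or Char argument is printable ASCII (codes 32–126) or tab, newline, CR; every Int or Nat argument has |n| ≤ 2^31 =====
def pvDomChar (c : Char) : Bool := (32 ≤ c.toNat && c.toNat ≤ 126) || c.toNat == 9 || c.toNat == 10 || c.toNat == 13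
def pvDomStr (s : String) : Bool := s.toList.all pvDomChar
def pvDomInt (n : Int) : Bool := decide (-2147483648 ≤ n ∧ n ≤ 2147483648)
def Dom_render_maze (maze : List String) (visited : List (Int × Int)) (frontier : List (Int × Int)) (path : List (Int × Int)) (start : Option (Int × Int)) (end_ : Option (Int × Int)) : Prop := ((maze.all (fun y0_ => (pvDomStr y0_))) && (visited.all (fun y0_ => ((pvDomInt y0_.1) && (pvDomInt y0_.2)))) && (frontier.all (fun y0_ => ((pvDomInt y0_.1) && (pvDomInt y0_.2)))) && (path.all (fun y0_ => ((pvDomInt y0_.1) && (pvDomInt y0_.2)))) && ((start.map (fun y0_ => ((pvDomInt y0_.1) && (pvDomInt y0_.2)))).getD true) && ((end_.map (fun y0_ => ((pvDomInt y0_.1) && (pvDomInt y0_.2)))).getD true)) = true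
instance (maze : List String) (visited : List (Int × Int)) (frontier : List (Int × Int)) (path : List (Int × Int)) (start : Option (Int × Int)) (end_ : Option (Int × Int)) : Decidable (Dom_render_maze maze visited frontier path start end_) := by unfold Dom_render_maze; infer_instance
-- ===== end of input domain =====

-- B replaces A's per-cell five-way elif chain by a painter's algorithm: render a base canvas from the maze, then stamp overlay layers onto it by index assignment in increasing precedence; alternative decomposition, same cost class.


-- the Color constants of the module
def colSTART : String := "\x1b[48;5;36m\x1b[97m . \x1b[0m"
def colEND : String := "\x1b[48;5;214m\x1b[97m E \x1b[0m"
def colRESULT : String := "\x1b[48;5;120m\x1b[32m * \x1b[0m"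
def colFRONTIER : String := "\x1b[48;5;222m\x1b[33m o \x1b[0m"
def colVISITED : String := "\x1b[48;5;152m\x1b[36m x \x1b[0m"
def colWALL : String := "\x1b[48;5;17m  \x1b[0m"
def colPATH : String := "\x1b[48;5;255m  \x1b[0m"

-- ===== PORT A =====
def render_maze (maze : List String) (visited : List (Int × Int)) (frontier : List (Int × Int)) (path : List (Int × Int)) (start : Option (Int × Int)) (end_ : Option (Int × Int)) : String :=
  let output : List String :=
    (PySem.List.enumerate maze 0).foldl (fun output rr =>
      let r := rr.1
      let row := rr.2
      let line : String :=
        (PySem.List.enumerate row.toList 0).foldl (fun line cc =>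
          let c := cc.1
          let cell := cc.2
          let pos := (r, c)
          if some pos = start then line ++ colSTART
          else if some pos = end_ then line ++ colEND
          else if pos ∈ path then line ++ colRESULT
          else if pos ∈ frontier then line ++ colFRONTIER
          else if pos ∈ visited then line ++ colVISITED
          else if cell = '#' then line ++ colWALL
          else line ++ colPATH) ""
      output ++ [line]) []
  PySem.Str.join "\n" output

-- ===== PORT B =====
-- canvas[r][c] := v when (r, c) is inside the canvas, else no-op (mirrors Source B's bounds guard)
def stampCell (g : List (List String)) (p : Int × Int) (v : String) : List (List String) :=
  if 0 ≤ p.1 ∧ p.1 < (g.length : Int) ∧ 0 ≤ p.2 ∧ p.2 < ((g.getD p.1.toNat []).length : Int) then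
    g.set p.1.toNat ((g.getD p.1.toNat []).set p.2.toNat v)
  else g

def stampLayer (g : List (List String)) (pts : List (Int × Int)) (v : String) : List (List String) :=
  pts.foldl (fun g p => stampCell g p v) g

def render_maze_alt (maze : List String) (visited : List (Int × Int)) (frontier : List (Int × Int)) (path : List (Int × Int)) (start : Option (Int × Int)) (end_ : Option (Int × Int)) : String :=
  let canvas : List (List String) :=
    maze.map (fun row => row.toList.map (fun ch => if ch = '#' then colWALL else colPATH))
  let canvas := stampLayer canvas visited colVISITED
  let canvas := stampLayer canvas frontier colFRONTIER
  let canvas := stampLayer canvas path colRESULT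
  let canvas := match end_ with | some e => stampLayer canvas [e] colEND | none => canvas
  let canvas := match start with | some s => stampLayer canvas [s] colSTART | none => canvas
  PySem.Str.join "\n" (canvas.map (fun row => PySem.Str.join "" row))

-- ===== PRECONDITION & SPEC =====
def Spec_render_maze (maze : List String) (visited : List (Int × Int)) (frontier : List (Int × Int)) (path : List (Int × Int)) (start : Option (Int × Int)) (end_ : Option (Int × Int)) (out : String) : Prop := out = render_maze_alt maze visited frontier path start end_
instance (maze : List String) (visited : List (Int × Int)) (frontier : List (Int × Int)) (path : List (Int × Int)) (start : Option (Int × Int)) (end_ : Option (Int × Int)) (out : String) : Decidable (Spec_render_maze maze visited frontier path start end_ out) := by unfold Spec_render_maze; infer_instance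

-- ===== CLAIM (what is proved, stated in full; the proofs are below) =====
def Claim_equal_render_maze : Prop := ∀ (maze : List String) (visited : List (Int × Int)) (frontier : List (Int × Int)) (path : List (Int × Int)) (start : Option (Int × Int)) (end_ : Option (Int × Int)), Dom_render_maze maze visited frontier path start end_ → Spec_render_maze maze visited frontier path start end_ (render_maze maze visited frontier path start end_)

-- ===== LEMMAS AND PROOFS =====

-- join with empty separator peels off the head
lemma join_empty_cons (a : String) (l : List String) :
    PySem.Str.join "" (a :: l) = a ++ PySem.Str.join "" l := by
  cases l with
  | nil => simp [PySem.Str.join, PySem.Chars.join_singleton, PySem.Chars.join_nil]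
  | cons b r =>
      simp [PySem.Str.join, PySem.Chars.join_cons_cons]

-- a string-accumulator loop whose step appends a per-element piece is the join of the mapped pieces
lemma foldl_str_append {α : Type} (g : String → α → String) (f : α → String)
    (h : ∀ acc x, g acc x = acc ++ f x) :
    ∀ (l : List α) (s : String),
      l.foldl g s = s ++ PySem.Str.join "" (l.map f) := by
  intro l
  induction l with
  | nil => intro s; simp [PySem.Str.join]
  | cons a t ih =>
      intro s
      simp only [List.foldl_cons, List.map_cons, ih, h, join_empty_cons, String.append_assoc]

-- a list-accumulator loop appending singletons is a map
lemma foldl_list_append {α β : Type} (g : α → β) :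
    ∀ (l : List α) (acc : List β),
      l.foldl (fun out x => out ++ [g x]) acc = acc ++ l.map g := by
  intro l
  induction l with
  | nil => intro acc; simp
  | cons a t ih => intro acc; simp [ih]

-- the cell of a canvas at Nat coordinates, as an Option
def accCell (g : List (List String)) (r c : Nat) : Option String :=
  g[r]?.bind (fun row => row[c]?)

lemma stampCell_length (g : List (List String)) (p : Int × Int) (v : String) :
    (stampCell g p v).length = g.length := by
  unfold stampCell; split <;> simp

lemma stampCell_rowlen (g : List (List String)) (p : Int × Int) (v : String) (r : Nat) :
    ((stampCell g p v)[r]?).map List.length = (g[r]?).map List.length := by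
  unfold stampCell
  split
  · rename_i h
    obtain ⟨h1, h2, h3, h4⟩ := h
    have hi : p.1.toNat < g.length := by omega
    rw [List.getElem?_set]
    by_cases hir : p.1.toNat = r
    · subst hir
      simp [hi, List.getElem?_eq_getElem hi, List.getD_eq_getElem g [] hi]
    · simp [hir]
  · rfl

lemma stampCell_acc (g : List (List String)) (p : Int × Int) (v : String) (r c : Nat) :
    accCell (stampCell g p v) r c
      = (accCell g r c).map (fun old => if p = ((r : Int), (c : Int)) then v else old) := by
  unfold accCell stampCell
  split
  · rename_i h
    obtain ⟨h1, h2, h3, h4⟩ := h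
    have hi : p.1.toNat < g.length := by omega
    have hrow : g.getD p.1.toNat [] = g[p.1.toNat]'hi := List.getD_eq_getElem g [] hi
    have hj : p.2.toNat < (g[p.1.toNat]'hi).length := by rw [hrow] at h4; omega
    rw [List.getElem?_set]
    by_cases hir : p.1.toNat = r
    · subst hir
      rw [if_pos rfl, if_pos hi, hrow, List.getElem?_eq_getElem hi]
      simp only [Option.bind_some, Option.map_bind]
      by_cases hjc : p.2.toNat = c
      · subst hjc
        have hp : p = ((p.1.toNat : Int), (p.2.toNat : Int)) := by
          ext <;> simp <;> omega
        rw [List.getElem?_set_self hj, List.getElem?_eq_getElem hj]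
        simp only [Option.bind_some, Option.map_some]
        rw [if_pos hp]
      · have hpne : p ≠ ((p.1.toNat : Int), (c : Int)) := by
          intro he
          apply hjc
          have : p.2 = (c : Int) := congrArg Prod.snd he
          omega
        rw [List.getElem?_set_ne hjc]
        cases hx : (g[p.1.toNat]'hi)[c]? with
        | none => simp
        | some old =>
            simp only [Option.bind_some, Option.map_some]
            rw [if_neg hpne]
    · have hpne : p ≠ ((r : Int), (c : Int)) := by
        intro he
        apply hir
        have : p.1 = (r : Int) := congrArg Prod.fst he
        omega
      rw [if_neg hir]
      cases hg : g[r]? with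
      | none => simp
      | some row =>
          cases hx : row[c]? with
          | none => simp [hx]
          | some old =>
              simp only [Option.bind_some, hx, Option.map_some]
              rw [if_neg hpne]
  · rename_i h
    cases hg : g[r]? with
    | none => simp
    | some row =>
        cases hx : row[c]? with
        | none => simp [hx]
        | some old =>
            have hr : r < g.length := by
              by_contra hcon
              simp [List.getElem?_eq_none (by omega : g.length ≤ r)] at hg
            have hc : c < row.length := by
              by_contra hcon
              simp [List.getElem?_eq_none (by omega : row.length ≤ c)] at hx
            by_cases hpe : p = ((r : Int), (c : Int))
            · exfalso
              apply h
              subst hpe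
              have hgd : g.getD r [] = row := by
                rw [List.getD_eq_getElem g [] hr]
                rw [List.getElem?_eq_getElem hr] at hg
                exact Option.some.inj hg
              refine ⟨by simp, by simp; omega, by simp, ?_⟩
              simp only [Int.toNat_natCast, hgd]
              simp; omega
            · simp only [Option.bind_some, hx, Option.map_some]
              rw [if_neg hpe]

lemma stampLayer_length (g : List (List String)) (pts : List (Int × Int)) (v : String) :
    (stampLayer g pts v).length = g.length := by
  induction pts generalizing g with
  | nil => rfl
  | cons a t ih => simp [stampLayer, List.foldl_cons] at *; rw [ih, stampCell_length]

lemma stampLayer_rowlen (g : List (List String)) (pts : List (Int × Int)) (v : String) (r : Nat) :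
    ((stampLayer g pts v)[r]?).map List.length = (g[r]?).map List.length := by
  induction pts generalizing g with
  | nil => rfl
  | cons a t ih => simp only [stampLayer, List.foldl_cons] at *; rw [ih, stampCell_rowlen]

lemma stampLayer_acc (g : List (List String)) (pts : List (Int × Int)) (v : String) (r c : Nat) :
    accCell (stampLayer g pts v) r c
      = (accCell g r c).map (fun old => if ((r : Int), (c : Int)) ∈ pts then v else old) := by
  induction pts generalizing g with
  | nil => cases h : accCell g r c <;> simp [stampLayer, h]
  | cons a t ih =>
      simp only [stampLayer, List.foldl_cons] at *
      rw [ih, stampCell_acc]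
      cases h : accCell g r c with
      | none => simp
      | some old =>
          simp only [Option.map_some, Option.some.injEq, List.mem_cons]
          by_cases h1 : ((r : Int), (c : Int)) ∈ t
          · simp [h1]
          · by_cases h2 : a = ((r : Int), (c : Int)) <;> simp [h1, h2, eq_comm]

-- orient option equations the way A's code writes them
lemma opt_eq_flip {α : Type} (o : Option α) (x : α) : (o = some x) = (some x = o) := propext eq_comm

-- the optional start/end stamps are stampLayer over Option.toList
lemma stamp_match_toList (g : List (List String)) (o : Option (Int × Int)) (v : String) :
    (match o with | some e => stampLayer g [e] v | none => g) = stampLayer g o.toList v := by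
  cases o <;> rfl

-- ===== VERDICT (by name: the statement is the Claim_ definition above) =====
theorem render_maze_spec : Claim_equal_render_maze := by
  intro maze visited frontier path start end_ _
  show render_maze maze visited frontier path start end_ = render_maze_alt maze visited frontier path start end_
  unfold render_maze render_maze_alt
  simp only [foldl_list_append, List.nil_append, stamp_match_toList]
  congr 1
  set base : List (List String) :=
    maze.map (fun row => row.toList.map (fun ch => if ch = '#' then colWALL else colPATH)) with hbase
  set C : List (List String) :=
    stampLayer (stampLayer (stampLayer (stampLayer (stampLayer base visited colVISITED)
      frontier colFRONTIER) path colRESULT) end_.toList colEND) start.toList colSTART with hC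
  have hClen : C.length = maze.length := by
    simp [hC, stampLayer_length, hbase]
  have hCrowlen : ∀ r : Nat, (C[r]?).map List.length = (base[r]?).map List.length := by
    intro r
    simp [hC, stampLayer_rowlen]
  have hCacc : ∀ r c : Nat,
      accCell C r c = (accCell base r c).map (fun old =>
        if some ((r : Int), (c : Int)) = start then colSTART
        else if some ((r : Int), (c : Int)) = end_ then colEND
        else if ((r : Int), (c : Int)) ∈ path then colRESULT
        else if ((r : Int), (c : Int)) ∈ frontier then colFRONTIER
        else if ((r : Int), (c : Int)) ∈ visited then colVISITED
        else old) := by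
    intro r c
    simp only [hC, stampLayer_acc]
    cases h : accCell base r c with
    | none => simp
    | some old =>
        simp only [Option.map_some, Option.mem_toList, opt_eq_flip]
  apply List.ext_getElem
  · simp [hClen, PySem.List.length_enumerate]
  · intro r hr1 hr2
    have hrm : r < maze.length := by simpa [PySem.List.length_enumerate] using hr1
    have hrC : r < C.length := by omega
    simp only [List.getElem_map, PySem.List.getElem_enumerate, zero_add]
    rw [foldl_str_append _
        (fun cc => if some ((r : Int), cc.1) = start then colSTART
          else if some ((r : Int), cc.1) = end_ then colEND
          else if ((r : Int), cc.1) ∈ path then colRESULT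
          else if ((r : Int), cc.1) ∈ frontier then colFRONTIER
          else if ((r : Int), cc.1) ∈ visited then colVISITED
          else if cc.2 = '#' then colWALL else colPATH)
        (fun acc cc => by dsimp only; split_ifs <;> rfl)]
    simp only [String.empty_append]
    congr 1
    have hrowB : base[r]? = some ((maze[r]'hrm).toList.map (fun ch => if ch = '#' then colWALL else colPATH)) := by
      simp [hbase, List.getElem?_eq_getElem hrm]
    have hrlen : (C[r]'hrC).length = (maze[r]'hrm).toList.length := by
      have := hCrowlen r
      rw [List.getElem?_eq_getElem hrC, hrowB] at this
      simpa using this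
    apply List.ext_getElem
    · simp [hrlen, PySem.List.length_enumerate]
    · intro c hc1 hc2
      have hcm : c < (maze[r]'hrm).toList.length := by
        simpa [PySem.List.length_enumerate] using hc1
      have hcC : c < (C[r]'hrC).length := by omega
      have haccC : accCell C r c = some ((C[r]'hrC)[c]'hcC) := by
        simp [accCell, List.getElem?_eq_getElem hrC, List.getElem?_eq_getElem hcC]
      have haccB : accCell base r c
          = some (if (maze[r]'hrm).toList[c]'hcm = '#' then colWALL else colPATH) := by
        simp [accCell, hrowB, List.getElem?_eq_getElem hcm]
      rw [hCacc r c, haccB] at haccC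
      simp only [Option.map_some, Option.some.injEq] at haccC
      simp only [List.getElem_map, PySem.List.getElem_enumerate, zero_add, haccC]
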